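-- pv_equiv track=rewrite | github.com/AlexGbenafa/examenPython | recursivite.py | divinRec
-- ===== SOURCE A (Python) =====
-- def divinRec(a, b):
--     d = a-b
--     if a < b:
--         print (0)
--         return 0
--     else:
--         print (1+divinRec(d, b))
--         return 1 + divinRec(d, b)
-- ===== SOURCE B (Python) =====
-- def divinRec(a, b):
--     # Closed form instead of A's exponential double recursion.
--     # (Return value only: A also prints intermediate quotients; B does not.)
--     return 0 if a < b else a // b
-- ===== Notes on version B (the rewrite author's own statement) =====
-- stated objective: faster
-- what changed: Replaces A's exponential double recursion (each step recomputes the whole sub-call once for the print and once for the return) by the closed-form floor division a // b guarded by the a < b base case; B does not reproduce A's debug prints (return value only).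
import Mathlib
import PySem

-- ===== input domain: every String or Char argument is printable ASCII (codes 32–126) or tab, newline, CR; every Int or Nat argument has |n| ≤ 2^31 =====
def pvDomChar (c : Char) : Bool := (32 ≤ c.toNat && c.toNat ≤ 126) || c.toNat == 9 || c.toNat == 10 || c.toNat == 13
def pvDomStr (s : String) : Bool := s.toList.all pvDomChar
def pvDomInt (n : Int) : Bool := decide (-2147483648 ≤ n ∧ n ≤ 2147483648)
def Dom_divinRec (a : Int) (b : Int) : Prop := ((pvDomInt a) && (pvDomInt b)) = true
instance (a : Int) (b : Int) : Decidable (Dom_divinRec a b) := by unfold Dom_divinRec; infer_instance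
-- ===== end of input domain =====

-- B replaces A's exponential double recursion by the closed form a // b (return value only:
-- A also prints intermediate quotients, B does not).

-- ===== PORT A =====
-- Literal port of A's repeated-subtraction recursion. The `print` duplicates the recursive
-- call; it returns the same value, so only the returned computation is modelled. The final
-- `else 0` branch is a totality guard for b ≤ 0 ∧ a ≥ b, where Python A never returns
-- (excluded by Pre_divinRec).
def divinRec (a : Int) (b : Int) : Int :=
  let d := a - b
  if a < b then 0
  else if h : 0 < b then 1 + divinRec d b
  else 0
termination_by a.toNat
decreasing_by
  simp only [not_lt] at *
  omega

-- ===== PORT B =====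
def divinRec_alt (a : Int) (b : Int) : Int :=
  if a < b then 0 else PySem.Int.floordiv a b

-- ===== PRECONDITION & SPEC =====
-- Pre_ excludes only b ≤ 0 ∧ a ≥ b, where Python A's recursion never reaches its base case
-- (a - b never drops below b) and it raises RecursionError instead of returning.
def Pre_divinRec (a : Int) (b : Int) : Prop := a < b ∨ 0 < b
instance (a : Int) (b : Int) : Decidable (Pre_divinRec a b) := by unfold Pre_divinRec; infer_instance
def pvWitness_divinRec : Int × Int := (7, 2)

def Spec_divinRec (a : Int) (b : Int) (out : Int) : Prop := out = divinRec_alt a b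
instance (a : Int) (b : Int) (out : Int) : Decidable (Spec_divinRec a b out) := by unfold Spec_divinRec; infer_instance

-- ===== CLAIM (what is proved, stated in full; the proofs are below) =====
def Claim_equal_divinRec : Prop := ∀ (a : Int) (b : Int), Dom_divinRec a b → Pre_divinRec a b → Spec_divinRec a b (divinRec a b)

-- ===== LEMMAS AND PROOFS =====

-- For a positive divisor the two ports agree for every a.
theorem divinRec_eq_alt_of_pos (a b : Int) (hb : 0 < b) : divinRec a b = divinRec_alt a b := by
  by_cases hab : a < b
  · rw [divinRec, divinRec_alt]
    simp [hab]
  · rw [divinRec, divinRec_alt]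
    simp only [hab, if_false, hb, dif_pos]
    have ih : divinRec (a - b) b = divinRec_alt (a - b) b :=
      divinRec_eq_alt_of_pos (a - b) b hb
    rw [ih, divinRec_alt]
    by_cases h2 : a - b < b
    · -- b ≤ a < 2b : the quotient is 1
      simp only [h2, if_pos]
      have h1 : PySem.Int.floordiv a b = 1 :=
        (PySem.Int.floordiv_eq_iff_of_pos hb).2 ⟨by omega, by omega⟩
      omega
    · -- a ≥ 2b : floordiv (a - b) b = floordiv a b - 1
      simp only [h2, if_false]
      have hrw : a = (a - b) + 1 * b := by ring
      rw [PySem.Int.floordiv_eq_ediv_of_pos hb,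
          PySem.Int.floordiv_eq_ediv_of_pos hb]
      nth_rewrite 2 [hrw]
      rw [Int.add_mul_ediv_right _ _ (by omega : b ≠ 0)]
      omega
termination_by a.toNat
decreasing_by
  simp only [not_lt] at *
  omega

-- ===== VERDICT (by name: the statement is the Claim_ definition above) =====
theorem divinRec_spec : Claim_equal_divinRec := by
  intro a b _ hpre
  unfold Spec_divinRec
  rcases hpre with hab | hb
  · rw [divinRec, divinRec_alt]; simp [hab]
  · exact divinRec_eq_alt_of_pos a b hb
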